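-- pv_equiv track=rewrite | github.com/frenzymadness/RH-devconf2018-challenge | generators.py | eval_prob
-- ===== SOURCE A (Python) =====
-- def eval_prob(me, enemy):
--     res = 0
--     for m in me:
--         for e in enemy:
--             if m>e:
--                 res += 1
--             if e>m:
--                 res -= 1
--     return res
-- ===== SOURCE B (Python) =====
-- def _bisect_left(a, x):
--     lo, hi = 0, len(a)
--     while lo < hi:
--         mid = (lo + hi) // 2
--         if a[mid] < x:
--             lo = mid + 1
--         else:
--             hi = mid
--     return lo
--
--
-- def _bisect_right(a, x):
--     lo, hi = 0, len(a)
--     while lo < hi: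
--         mid = (lo + hi) // 2
--         if x < a[mid]:
--             hi = mid
--         else:
--             lo = mid + 1
--     return lo
--
--
-- def eval_prob(me, enemy):
--     es = sorted(enemy)
--     n = len(es)
--     res = 0
--     for m in me:
--         res += _bisect_left(es, m) - (n - _bisect_right(es, m))
--     return res
-- ===== Notes on version B (the rewrite author's own statement) =====
-- stated objective: faster
-- what changed: Sort enemy once and use hand-written binary searches (bisect_left/bisect_right) to count smaller/greater enemies per m, instead of the nested pairwise comparison loops.
import Mathlib
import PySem

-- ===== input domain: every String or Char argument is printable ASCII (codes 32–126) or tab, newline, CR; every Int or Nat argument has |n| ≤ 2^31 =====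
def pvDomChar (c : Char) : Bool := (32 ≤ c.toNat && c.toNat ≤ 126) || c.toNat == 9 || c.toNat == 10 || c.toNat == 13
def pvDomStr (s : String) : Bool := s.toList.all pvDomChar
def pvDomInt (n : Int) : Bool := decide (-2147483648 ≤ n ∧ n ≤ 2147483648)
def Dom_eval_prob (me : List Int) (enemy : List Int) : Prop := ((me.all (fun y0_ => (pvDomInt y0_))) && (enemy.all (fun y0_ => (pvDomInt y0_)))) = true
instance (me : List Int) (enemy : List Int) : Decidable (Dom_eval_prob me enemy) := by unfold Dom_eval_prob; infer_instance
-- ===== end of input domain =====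

-- B sorts enemy once and binary-searches counts of smaller/greater enemies per m
-- instead of comparing every pair; objective: faster (asymptotic).


-- ===== PORT A =====
def eval_prob (me : List Int) (enemy : List Int) : Int :=
  me.foldl (fun res m =>
    enemy.foldl (fun res e =>
      let res := if m > e then res + 1 else res
      if e > m then res - 1 else res) res) 0

-- ===== PORT B =====
-- hand-written bisect while-loops of Source B, fuel-based (fuel = len(a), enough for binary search)
def pvBLLoop (a : List Int) (x : Int) : Nat → Nat → Nat → Nat
  | 0, lo, _ => lo
  | fuel+1, lo, hi =>
    if lo < hi then
      match a[(lo + hi) / 2]? with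
      | some y => if y < x then pvBLLoop a x fuel ((lo + hi) / 2 + 1) hi
                  else pvBLLoop a x fuel lo ((lo + hi) / 2)
      | none => lo
    else lo

def pvBRLoop (a : List Int) (x : Int) : Nat → Nat → Nat → Nat
  | 0, lo, _ => lo
  | fuel+1, lo, hi =>
    if lo < hi then
      match a[(lo + hi) / 2]? with
      | some y => if x < y then pvBRLoop a x fuel lo ((lo + hi) / 2)
                  else pvBRLoop a x fuel ((lo + hi) / 2 + 1) hi
      | none => lo
    else lo

def pvBisectLeft (a : List Int) (x : Int) : Nat := pvBLLoop a x a.length 0 a.length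
def pvBisectRight (a : List Int) (x : Int) : Nat := pvBRLoop a x a.length 0 a.length

def eval_prob_alt (me : List Int) (enemy : List Int) : Int :=
  let es := PySem.List.sorted enemy (fun e => e)
  let n := es.length
  me.foldl (fun res m =>
    res + ((pvBisectLeft es m : Int) - ((n : Int) - (pvBisectRight es m : Int)))) 0

-- ===== PRECONDITION & SPEC =====
def Spec_eval_prob (me : List Int) (enemy : List Int) (out : Int) : Prop := out = eval_prob_alt me enemy
instance (me : List Int) (enemy : List Int) (out : Int) : Decidable (Spec_eval_prob me enemy out) := by unfold Spec_eval_prob; infer_instance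

-- ===== CLAIM (what is proved, stated in full; the proofs are below) =====
def Claim_equal_eval_prob : Prop := ∀ (me : List Int) (enemy : List Int), Dom_eval_prob me enemy → Spec_eval_prob me enemy (eval_prob me enemy)

-- ===== LEMMAS AND PROOFS =====

-- the hand-written loops are the same recursion as PySem's bisect loops
theorem pvBLLoop_eq (a : List Int) (x : Int) (fuel lo hi : Nat) :
    pvBLLoop a x fuel lo hi = PySem.List.bisectLeftLoop a x fuel lo hi := by
  induction fuel generalizing lo hi with
  | zero => rfl
  | succ n ih =>
    simp only [pvBLLoop, PySem.List.bisectLeftLoop]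
    split_ifs with h
    · cases a[(lo + hi) / 2]? with
      | none => rfl
      | some y => by_cases hy : y < x <;> simp [hy, ih]
    · rfl

theorem pvBRLoop_eq (a : List Int) (x : Int) (fuel lo hi : Nat) :
    pvBRLoop a x fuel lo hi = PySem.List.bisectRightLoop a x fuel lo hi := by
  induction fuel generalizing lo hi with
  | zero => rfl
  | succ n ih =>
    simp only [pvBRLoop, PySem.List.bisectRightLoop]
    split_ifs with h
    · cases a[(lo + hi) / 2]? with
      | none => rfl
      | some y => by_cases hy : x < y <;> simp [hy, ih]
    · rfl

theorem pvBisectLeft_eq (a : List Int) (x : Int) :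
    pvBisectLeft a x = PySem.List.bisectLeft a x := pvBLLoop_eq a x a.length 0 a.length

theorem pvBisectRight_eq (a : List Int) (x : Int) :
    pvBisectRight a x = PySem.List.bisectRight a x := pvBRLoop_eq a x a.length 0 a.length

-- countP of a prefix-determined predicate
theorem countP_of_index_iff (p : Int → Bool) (l : List Int) (k : Nat) (hk : k ≤ l.length)
    (h : ∀ j (hj : j < l.length), p l[j] = true ↔ j < k) :
    l.countP p = k := by
  have hsplit : l = l.take k ++ l.drop k := (List.take_append_drop k l).symm
  rw [hsplit, List.countP_append]
  have h1 : (l.take k).countP p = (l.take k).length := by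
    rw [List.countP_eq_length]
    intro a ha
    obtain ⟨j, hj, rfl⟩ := List.mem_iff_getElem.mp ha
    have hjk : j < k := by simp at hj; omega
    have hj' : j < l.length := by omega
    have : (l.take k)[j] = l[j] := List.getElem_take
    rw [this]
    exact (h j hj').mpr hjk
  have h2 : (l.drop k).countP p = 0 := by
    rw [List.countP_eq_zero]
    intro a ha
    obtain ⟨j, hj, rfl⟩ := List.mem_iff_getElem.mp ha
    have hj' : k + j < l.length := by simp at hj; omega
    have : (l.drop k)[j] = l[k + j] := List.getElem_drop
    rw [this]
    intro hp
    have := (h (k + j) hj').mp hp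
    omega
  rw [h1, h2, List.length_take]
  omega

theorem bisectLeft_countP (a : List Int) (x : Int) (hs : a.Pairwise (· ≤ ·)) :
    pvBisectLeft a x = a.countP (fun e => decide (e < x)) := by
  obtain ⟨hle, hlt, hge⟩ := PySem.List.bisectLeft_spec a x hs
  rw [pvBisectLeft_eq]
  refine (countP_of_index_iff _ a _ hle ?_).symm
  intro j hj
  constructor
  · intro hp
    by_contra hcon
    have := hge j hj (by omega)
    simp at hp
    omega
  · intro hjk
    simpa using hlt j hj hjk

theorem bisectRight_countP (a : List Int) (x : Int) (hs : a.Pairwise (· ≤ ·)) :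
    pvBisectRight a x = a.countP (fun e => decide (e ≤ x)) := by
  obtain ⟨hle, hlt, hge⟩ := PySem.List.bisectRight_spec a x hs
  rw [pvBisectRight_eq]
  refine (countP_of_index_iff _ a _ hle ?_).symm
  intro j hj
  constructor
  · intro hp
    by_contra hcon
    have := hge j hj (by omega)
    simp at hp
    omega
  · intro hjk
    simpa using hlt j hj hjk

-- inner loop of A computes count(e < m) - count(e > m)
theorem innerA (enemy : List Int) (m : Int) (res : Int) :
    enemy.foldl (fun res e =>
      let res := if m > e then res + 1 else res
      if e > m then res - 1 else res) res
    = res + (enemy.countP (fun e => decide (e < m)) : Int)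
          - (enemy.countP (fun e => decide (m < e)) : Int) := by
  induction enemy generalizing res with
  | nil => simp
  | cons e t ih =>
    simp only [List.foldl_cons, List.countP_cons, ih]
    by_cases h1 : m > e <;> by_cases h2 : e > m <;>
      simp [h1, h2, gt_iff_lt] <;> omega

theorem eval_prob_eq (me enemy : List Int) : eval_prob me enemy = eval_prob_alt me enemy := by
  unfold eval_prob eval_prob_alt
  have hperm : (PySem.List.sorted enemy (fun e => e)).Perm enemy :=
    PySem.List.sorted_perm enemy (fun e => e) false
  have hpw : (PySem.List.sorted enemy (fun e => e)).Pairwise (· ≤ ·) :=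
    PySem.List.sorted_pairwise enemy (fun e => e)
  apply PySem.List.foldl_congr_mem
  intro res m _
  rw [innerA]
  set es := PySem.List.sorted enemy (fun e => e) with hes
  rw [bisectLeft_countP es m hpw, bisectRight_countP es m hpw]
  have hlen : es.length = es.countP (fun e => decide (e ≤ m)) + es.countP (fun e => decide (m < e)) := by
    have := List.length_eq_countP_add_countP (p := fun e => decide (e ≤ m)) (l := es)
    rw [this]
    congr 1
    apply List.countP_congr
    intro e _
    simp
  have hcl : es.countP (fun e => decide (e < m)) = enemy.countP (fun e => decide (e < m)) :=
    hperm.countP_eq _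
  have hcg : es.countP (fun e => decide (m < e)) = enemy.countP (fun e => decide (m < e)) :=
    hperm.countP_eq _
  rw [hcl]
  have : ((es.length : Int) - (es.countP (fun e => decide (e ≤ m)) : Int))
       = (enemy.countP (fun e => decide (m < e)) : Int) := by
    rw [← hcg]
    omega
  omega

-- ===== VERDICT (by name: the statement is the Claim_ definition above) =====
theorem eval_prob_spec : Claim_equal_eval_prob := by
  intro me enemy _
  unfold Spec_eval_prob
  exact eval_prob_eq me enemy
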